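-- pv_equiv track=rewrite | github.com/sergiopolid/journal_digest | main_complete.py | format_for_curation
-- ===== SOURCE A (Python) =====
-- def format_for_curation(articles):
--     """Format articles by relevance"""
--     highly_relevant = []
--     medium_relevant = []
--     potentially_relevant = []
--
--     keywords_high = ['ra-ild', 'rheumatoid', 'jak inhibitor', 'nintedanib', 'pirfenidone', 'ild']
--     keywords_medium = ['interstitial lung', 'hemodynamic', 'ett', 'coagulopathy', 'critical care', 'ards']
--
--     for article in articles:
--         text = (article['title'] + ' ' + article.get('summary', '')).lower()
--
--         if any(kw in text for kw in keywords_high):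
--             highly_relevant.append(article)
--         elif any(kw in text for kw in keywords_medium):
--             medium_relevant.append(article)
--         else:
--             potentially_relevant.append(article)
--
--     return highly_relevant, medium_relevant, potentially_relevant
-- ===== SOURCE B (Python) =====
-- KEYWORDS_HIGH = ['ra-ild', 'rheumatoid', 'jak inhibitor', 'nintedanib', 'pirfenidone', 'ild']
-- KEYWORDS_MEDIUM = ['interstitial lung', 'hemodynamic', 'ett', 'coagulopathy', 'critical care', 'ards']
--
--
-- def _text(article):
--     return (article['title'] + ' ' + article.get('summary', '')).lower()
--
--
-- def _has_high(article):
--     t = _text(article)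
--     return any(kw in t for kw in KEYWORDS_HIGH)
--
--
-- def _has_medium(article):
--     t = _text(article)
--     return any(kw in t for kw in KEYWORDS_MEDIUM)
--
--
-- def format_for_curation(articles):
--     """Format articles by relevance"""
--     high = [a for a in articles if _has_high(a)]
--     medium = [a for a in articles if _has_medium(a) and not _has_high(a)]
--     potential = [a for a in articles if not _has_high(a) and not _has_medium(a)]
--     return high, medium, potential
-- ===== Notes on version B (the rewrite author's own statement) =====
-- stated objective: idiomatic
-- what changed: Replaces the single three-way assigning loop with three independent filtering passes (list comprehensions), one per tier, with the keyword tests factored into helper predicates; tier priority is expressed by negating the stronger predicates.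
import Mathlib
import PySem

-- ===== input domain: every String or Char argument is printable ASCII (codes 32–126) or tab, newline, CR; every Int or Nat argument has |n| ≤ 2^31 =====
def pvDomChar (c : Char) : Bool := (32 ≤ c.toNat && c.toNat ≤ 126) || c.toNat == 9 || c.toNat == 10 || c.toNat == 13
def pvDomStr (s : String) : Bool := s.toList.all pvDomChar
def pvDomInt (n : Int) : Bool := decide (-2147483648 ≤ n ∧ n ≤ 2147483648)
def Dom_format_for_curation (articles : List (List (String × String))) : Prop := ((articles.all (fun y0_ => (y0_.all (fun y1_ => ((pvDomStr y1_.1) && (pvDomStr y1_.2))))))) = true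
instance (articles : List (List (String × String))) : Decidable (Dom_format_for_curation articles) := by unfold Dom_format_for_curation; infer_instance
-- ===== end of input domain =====

-- B replaces A's single assigning loop with three independent filtering passes (one per tier)
-- built from helper predicates; same return value on every input with a 'title' key (idiomatic, not faster).

-- ===== PORT A =====
-- A: one loop, appending each article to exactly one of three accumulators.
def format_for_curation (articles : List (List (String × String))) : (List (List (String × String))) × (List (List (String × String))) × (List (List (String × String))) :=
  let keywords_high : List String := ["ra-ild", "rheumatoid", "jak inhibitor", "nintedanib", "pirfenidone", "ild"]
  let keywords_medium : List String := ["interstitial lung", "hemodynamic", "ett", "coagulopathy", "critical care", "ards"]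
  articles.foldl
    (fun acc article =>
      -- article['title'] raises KeyError when absent: that case is excluded by Pre_ (the 'none' branch is unreachable there)
      match (PySem.Dict.mk article).get? "title" with
      | none => acc
      | some title =>
        let summary := ((PySem.Dict.mk article).get? "summary").getD ""
        let text : List Char := PySem.Chars.lower (title.toList ++ ' ' :: summary.toList)
        if keywords_high.any (fun kw => PySem.Chars.isIn kw.toList text) then
          (acc.1 ++ [article], acc.2.1, acc.2.2)
        else if keywords_medium.any (fun kw => PySem.Chars.isIn kw.toList text) then
          (acc.1, acc.2.1 ++ [article], acc.2.2)
        else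
          (acc.1, acc.2.1, acc.2.2 ++ [article]))
    ([], [], [])

-- ===== PORT B =====
def pvKwHigh : List String := ["ra-ild", "rheumatoid", "jak inhibitor", "nintedanib", "pirfenidone", "ild"]
def pvKwMedium : List String := ["interstitial lung", "hemodynamic", "ett", "coagulopathy", "critical care", "ards"]

-- _text(article); 'none' (missing title = KeyError in Source B too) is outside Pre_
def pvText (article : List (String × String)) : Option (List Char) :=
  match (PySem.Dict.mk article).get? "title" with
  | none => none
  | some title =>
      some (PySem.Chars.lower (title.toList ++ ' ' :: (((PySem.Dict.mk article).get? "summary").getD "").toList))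

def pvHasHigh (article : List (String × String)) : Bool :=
  match pvText article with
  | none => false
  | some t => pvKwHigh.any (fun kw => PySem.Chars.isIn kw.toList t)

def pvHasMedium (article : List (String × String)) : Bool :=
  match pvText article with
  | none => false
  | some t => pvKwMedium.any (fun kw => PySem.Chars.isIn kw.toList t)

def format_for_curation_alt (articles : List (List (String × String))) : (List (List (String × String))) × (List (List (String × String))) × (List (List (String × String))) :=
  (articles.filter (fun a => pvHasHigh a),
   articles.filter (fun a => pvHasMedium a && !pvHasHigh a),
   articles.filter (fun a => !pvHasHigh a && !pvHasMedium a))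

-- ===== PRECONDITION & SPEC =====
-- Pre_ excludes articles without a 'title' key, on which Python A raises KeyError.
def Pre_format_for_curation (articles : List (List (String × String))) : Prop :=
  (articles.all (fun a => (PySem.Dict.mk a).contains "title")) = true
instance (articles : List (List (String × String))) : Decidable (Pre_format_for_curation articles) := by unfold Pre_format_for_curation; infer_instance

def pvWitness_format_for_curation : (List (List (String × String))) :=
  [[("title", "RA-ILD update"), ("summary", "new trial")], [("title", "unrelated news")]]

def Spec_format_for_curation (articles : List (List (String × String))) (out : (List (List (String × String))) × (List (List (String × String))) × (List (List (String × String)))) : Prop := out = format_for_curation_alt articles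
instance (articles : List (List (String × String))) (out : (List (List (String × String))) × (List (List (String × String))) × (List (List (String × String)))) : Decidable (Spec_format_for_curation articles out) := by unfold Spec_format_for_curation; infer_instance

-- ===== CLAIM (what is proved, stated in full; the proofs are below) =====
def Claim_equal_format_for_curation : Prop := ∀ (articles : List (List (String × String))), Dom_format_for_curation articles → Pre_format_for_curation articles → Spec_format_for_curation articles (format_for_curation articles)

-- ===== LEMMAS AND PROOFS =====

-- A's loop, started from any accumulator, appends B's three filters (for articles that all carry a title).
lemma pv_loop_eq (l : List (List (String × String)))
    (hl : ∀ a ∈ l, ((PySem.Dict.mk a).get? "title").isSome) :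
    ∀ h m p : List (List (String × String)),
      l.foldl
        (fun acc article =>
          match (PySem.Dict.mk article).get? "title" with
          | none => acc
          | some title =>
            let summary := ((PySem.Dict.mk article).get? "summary").getD ""
            let text : List Char := PySem.Chars.lower (title.toList ++ ' ' :: summary.toList)
            if pvKwHigh.any (fun kw => PySem.Chars.isIn kw.toList text) then
              (acc.1 ++ [article], acc.2.1, acc.2.2)
            else if pvKwMedium.any (fun kw => PySem.Chars.isIn kw.toList text) then
              (acc.1, acc.2.1 ++ [article], acc.2.2)
            else
              (acc.1, acc.2.1, acc.2.2 ++ [article]))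
        (h, m, p)
      = (h ++ l.filter (fun a => pvHasHigh a),
         m ++ l.filter (fun a => pvHasMedium a && !pvHasHigh a),
         p ++ l.filter (fun a => !pvHasHigh a && !pvHasMedium a)) := by
  induction l with
  | nil => intro h m p; simp
  | cons a t ih =>
    intro h m p
    have ha := hl a (by simp)
    obtain ⟨title, htitle⟩ := Option.isSome_iff_exists.mp ha
    have ht : ∀ b ∈ t, ((PySem.Dict.mk b).get? "title").isSome := fun b hb => hl b (by simp [hb])
    have hH : pvHasHigh a =
        pvKwHigh.any (fun kw => PySem.Chars.isIn kw.toList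
          (PySem.Chars.lower (title.toList ++ ' ' :: (((PySem.Dict.mk a).get? "summary").getD "").toList))) := by
      simp [pvHasHigh, pvText, htitle]
    have hM : pvHasMedium a =
        pvKwMedium.any (fun kw => PySem.Chars.isIn kw.toList
          (PySem.Chars.lower (title.toList ++ ' ' :: (((PySem.Dict.mk a).get? "summary").getD "").toList))) := by
      simp [pvHasMedium, pvText, htitle]
    simp only [List.foldl_cons, htitle]
    by_cases c1 : (pvKwHigh.any (fun kw => PySem.Chars.isIn kw.toList
        (PySem.Chars.lower (title.toList ++ ' ' :: (((PySem.Dict.mk a).get? "summary").getD "").toList)))) = true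
    · rw [if_pos c1, ih ht]
      have hh : pvHasHigh a = true := by rw [hH]; exact c1
      simp [hh]
    · have hh : pvHasHigh a = false := by rw [hH]; simpa using c1
      by_cases c2 : (pvKwMedium.any (fun kw => PySem.Chars.isIn kw.toList
          (PySem.Chars.lower (title.toList ++ ' ' :: (((PySem.Dict.mk a).get? "summary").getD "").toList)))) = true
      · rw [if_neg c1, if_pos c2, ih ht]
        have hm : pvHasMedium a = true := by rw [hM]; exact c2
        simp [hh, hm]
      · rw [if_neg c1, if_neg c2, ih ht]
        have hm : pvHasMedium a = false := by rw [hM]; simpa using c2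
        simp [hh, hm]

-- ===== VERDICT (by name: the statement is the Claim_ definition above) =====
theorem format_for_curation_spec : Claim_equal_format_for_curation := by
  intro articles _ hpre
  unfold Spec_format_for_curation format_for_curation format_for_curation_alt
  have hl : ∀ a ∈ articles, ((PySem.Dict.mk a).get? "title").isSome := by
    intro a ha
    have := (List.all_eq_true.mp hpre) a ha
    rwa [PySem.Dict.contains_eq_isSome_get?] at this
  have := pv_loop_eq articles hl [] [] []
  simpa [pvKwHigh, pvKwMedium] using this
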